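-- pv_equiv track=rewrite | github.com/sskwork/numscn | utils.py | validate_grid_data
-- ===== SOURCE A (Python) =====
-- def validate_grid_data(grid_data):
--     """Validate extracted grid data"""
--     if not grid_data:
--         return False
--
--     # Check if it's a 2D list
--     if not isinstance(grid_data, list):
--         return False
--
--     if not all(isinstance(row, list) for row in grid_data):
--         return False
--
--     # Check consistency
--     row_lengths = [len(row) for row in grid_data]
--     if len(set(row_lengths)) > 1:
--         return False
--
--     return True
-- ===== SOURCE B (Python) =====
-- def validate_grid_data(grid_data):
--     """Validate extracted grid data: one pass with a scalar expected-length invariant."""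
--     if not grid_data:
--         return False
--     if not isinstance(grid_data, list):
--         return False
--     expected = None
--     for row in grid_data:
--         if not isinstance(row, list):
--             return False
--         if expected is None:
--             expected = len(row)
--         elif len(row) != expected:
--             return False
--     return True
-- ===== Notes on version B (the rewrite author's own statement) =====
-- stated objective: simpler
-- what changed: Replaces the two extra passes (isinstance comprehension plus a row-lengths list deduplicated through a set) by a single loop over the rows that carries one scalar: the expected row length, set at the first row and compared against thereafter.
import Mathlib
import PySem

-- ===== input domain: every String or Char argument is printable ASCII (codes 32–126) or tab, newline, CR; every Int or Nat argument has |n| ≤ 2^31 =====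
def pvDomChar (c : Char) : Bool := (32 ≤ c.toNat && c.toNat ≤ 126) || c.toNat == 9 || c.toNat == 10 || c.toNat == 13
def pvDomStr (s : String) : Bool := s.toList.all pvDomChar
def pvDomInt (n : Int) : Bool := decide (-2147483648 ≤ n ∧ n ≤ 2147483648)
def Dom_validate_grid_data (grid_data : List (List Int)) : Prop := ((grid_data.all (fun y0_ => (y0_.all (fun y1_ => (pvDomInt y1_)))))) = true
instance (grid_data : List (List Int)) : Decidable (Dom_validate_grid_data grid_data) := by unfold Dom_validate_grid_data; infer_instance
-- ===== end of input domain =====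

-- B changes: one pass with a scalar expected-length invariant instead of three passes and a set (objective: simpler).

-- ===== PORT A =====
-- A: empty check; isinstance checks are identically true on the typed input; then the
-- row-lengths list and the set-cardinality test, transcribed with PySem.Set.
def validate_grid_data (grid_data : List (List Int)) : Bool :=
  if grid_data = [] then false
  else
    let row_lengths := grid_data.map (fun row => row.length)
    if (PySem.Set.ofList row_lengths).length > 1 then false
    else true

-- ===== PORT B =====
-- B's loop: 'expected' starts as none, is set at the first row, later rows must match.
def vgdLoop (expected : Option Nat) : List (List Int) → Bool
  | [] => true
  | row :: rest =>
    match expected with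
    | none => vgdLoop (some row.length) rest
    | some e => if row.length ≠ e then false else vgdLoop (some e) rest

def validate_grid_data_alt (grid_data : List (List Int)) : Bool :=
  if grid_data = [] then false
  else vgdLoop none grid_data

-- ===== PRECONDITION & SPEC =====
def Spec_validate_grid_data (grid_data : List (List Int)) (out : Bool) : Prop := out = validate_grid_data_alt grid_data
instance (grid_data : List (List Int)) (out : Bool) : Decidable (Spec_validate_grid_data grid_data out) := by unfold Spec_validate_grid_data; infer_instance

-- ===== CLAIM (what is proved, stated in full; the proofs are below) =====
def Claim_equal_validate_grid_data : Prop := ∀ (grid_data : List (List Int)), Dom_validate_grid_data grid_data → Spec_validate_grid_data grid_data (validate_grid_data grid_data)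

-- ===== LEMMAS AND PROOFS =====

theorem vgdLoop_some (e : Nat) (rs : List (List Int)) :
    vgdLoop (some e) rs = rs.all (fun r => r.length == e) := by
  induction rs with
  | nil => rfl
  | cons r rest ih =>
    simp only [vgdLoop, List.all_cons, ih]
    by_cases h : r.length = e <;> simp [h]

theorem foldl_add_const {α : Type} [BEq α] [LawfulBEq α] (e : α) (ls : List α)
    (h : ∀ x ∈ ls, x = e) : ls.foldl PySem.Set.add [e] = [e] := by
  induction ls with
  | nil => rfl
  | cons x xs ih =>
    have hx : x = e := h x (by simp)
    have hadd : PySem.Set.add [e] x = [e] := by simp [PySem.Set.add, hx]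
    simp only [List.foldl_cons, hadd]
    exact ih (fun y hy => h y (by simp [hy]))

theorem ofList_const {α : Type} [BEq α] [LawfulBEq α] (e : α) (ls : List α)
    (h : ∀ x ∈ ls, x = e) : PySem.Set.ofList (e :: ls) = [e] := by
  rw [PySem.Set.ofList_eq_foldl]
  show (e :: ls).foldl PySem.Set.add [] = [e]
  simp only [List.foldl_cons]
  have h0 : PySem.Set.add ([] : List α) e = [e] := rfl
  rw [h0]
  exact foldl_add_const e ls h

theorem two_mem_length {α : Type} (s : List α) (x y : α) (hx : x ∈ s) (hy : y ∈ s)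
    (hne : x ≠ y) : 2 ≤ s.length := by
  match s with
  | [] => simp at hx
  | [a] =>
    simp at hx hy; exact absurd (hx.trans hy.symm) hne
  | a :: b :: t => simp

-- ===== VERDICT (by name: the statement is the Claim_ definition above) =====
theorem validate_grid_data_spec : Claim_equal_validate_grid_data := by
  intro grid_data _
  unfold Spec_validate_grid_data validate_grid_data validate_grid_data_alt
  match grid_data with
  | [] => rfl
  | r :: rs =>
    simp only [if_neg (List.cons_ne_nil r rs)]
    show (if (PySem.Set.ofList ((r :: rs).map (fun row => row.length))).length > 1
          then false else true) = vgdLoop none (r :: rs)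
    have hB : vgdLoop none (r :: rs) = rs.all (fun x => x.length == r.length) := by
      show vgdLoop (some r.length) rs = _
      exact vgdLoop_some r.length rs
    rw [hB]
    by_cases h : ∀ x ∈ rs, x.length = r.length
    · have hset : PySem.Set.ofList ((r :: rs).map (fun row => row.length)) = [r.length] := by
        simp only [List.map_cons]
        exact ofList_const r.length (rs.map (fun row => row.length))
          (by intro x hx; obtain ⟨y, hy, rfl⟩ := List.mem_map.mp hx; exact h y hy)
      rw [hset]
      simp only [List.length_cons, List.length_nil]
      rw [if_neg (by omega)]
      symm; simp only [List.all_eq_true]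
      intro x hx; exact beq_iff_eq.mpr (h x hx)
    · push Not at h
      obtain ⟨x, hx, hne⟩ := h
      have hmemx : x.length ∈ PySem.Set.ofList ((r :: rs).map (fun row => row.length)) := by
        rw [PySem.Set.mem_ofList]; exact List.mem_map.mpr ⟨x, by simp [hx], rfl⟩
      have hmemr : r.length ∈ PySem.Set.ofList ((r :: rs).map (fun row => row.length)) := by
        rw [PySem.Set.mem_ofList]; exact List.mem_map.mpr ⟨r, by simp, rfl⟩
      have h2 := two_mem_length _ _ _ hmemx hmemr hne
      rw [if_pos (by omega)]
      symm; simp only [List.all_eq_false]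
      exact ⟨x, hx, by simp [hne]⟩
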